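-- pv_equiv track=rewrite | github.com/robertolima-dev/text-cleaner-for-py | text_cleaner_for_py/performance_cleaner.py | remove_ocr_noise
-- ===== SOURCE A (Python) =====
-- def remove_ocr_noise(text: str) -> str:
--     """Remove ruído comum em textos de OCR."""
--     # Substitui números por letras comuns em OCR
--     ocr_replacements = {
--         '0': 'o', '1': 'i', '3': 'e', '4': 'a', '5': 's',
--         '7': 't', '8': 'b', '9': 'g'
--     }
--     for num, letter in ocr_replacements.items():
--         text = text.replace(num, letter)
--     return text
-- ===== SOURCE B (Python) =====
-- def remove_ocr_noise(text: str) -> str: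
--     """Remove ruído comum em textos de OCR: single pass with an explicit
--     accumulator and a per-character conditional chain (no dict, no replace)."""
--     out = []
--     for c in text:
--         if c == '0':
--             out.append('o')
--         elif c == '1':
--             out.append('i')
--         elif c == '3':
--             out.append('e')
--         elif c == '4':
--             out.append('a')
--         elif c == '5':
--             out.append('s')
--         elif c == '7':
--             out.append('t')
--         elif c == '8':
--             out.append('b')
--         elif c == '9':
--             out.append('g')
--         else:
--             out.append(c)
--     return ''.join(out)
-- ===== Notes on version B (the rewrite author's own statement) =====
-- stated objective: alternative
-- what changed: Replaces eight sequential full-string str.replace passes over a replacement dict by one pass over the input characters with an explicit accumulator and a per-character if/elif chain, with no dict and no replace.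
import Mathlib
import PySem

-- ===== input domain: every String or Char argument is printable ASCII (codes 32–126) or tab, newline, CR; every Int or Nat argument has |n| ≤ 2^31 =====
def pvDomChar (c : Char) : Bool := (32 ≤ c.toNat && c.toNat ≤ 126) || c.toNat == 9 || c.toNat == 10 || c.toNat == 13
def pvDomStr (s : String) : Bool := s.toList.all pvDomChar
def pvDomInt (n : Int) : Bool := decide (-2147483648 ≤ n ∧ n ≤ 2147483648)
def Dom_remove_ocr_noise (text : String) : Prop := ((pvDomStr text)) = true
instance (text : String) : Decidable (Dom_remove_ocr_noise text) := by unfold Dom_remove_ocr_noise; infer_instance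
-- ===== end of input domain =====

-- B replaces A's eight sequential full-string replace passes over a dict by one accumulator
-- pass with a per-character conditional chain (alternative decomposition; same result).

-- ===== PORT A =====
-- The Python dict's 1-char string keys/values are ported as Char; A iterates its items in
-- insertion order and does a full-string replace for each pair.
def ocrReplacements : PySem.Dict Char Char :=
  PySem.Dict.ofList [('0','o'),('1','i'),('3','e'),('4','a'),('5','s'),('7','t'),('8','b'),('9','g')]

def remove_ocr_noise (text : String) : String :=
  ocrReplacements.items.foldl
    (fun t p => PySem.Str.replace t (String.ofList [p.1]) (String.ofList [p.2])) text

-- ===== PORT B =====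
-- Source B's if/elif chain deciding the character appended for c.
def ocrFix (c : Char) : Char :=
  if c = '0' then 'o'
  else if c = '1' then 'i'
  else if c = '3' then 'e'
  else if c = '4' then 'a'
  else if c = '5' then 's'
  else if c = '7' then 't'
  else if c = '8' then 'b'
  else if c = '9' then 'g'
  else c

-- Source B's loop: the accumulator `out` is built front-to-back (kept reversed, as a Python list
-- append; reversed at the join).
def removeOcrGo : List Char → List Char → List Char
  | acc, [] => acc.reverse
  | acc, c :: rest => removeOcrGo (ocrFix c :: acc) rest

def remove_ocr_noise_alt (text : String) : String :=
  String.ofList (removeOcrGo [] text.toList)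

-- ===== PRECONDITION & SPEC =====
def Spec_remove_ocr_noise (text : String) (out : String) : Prop := out = remove_ocr_noise_alt text
instance (text : String) (out : String) : Decidable (Spec_remove_ocr_noise text out) := by unfold Spec_remove_ocr_noise; infer_instance

-- ===== CLAIM (what is proved, stated in full; the proofs are below) =====
def Claim_equal_remove_ocr_noise : Prop := ∀ (text : String), Dom_remove_ocr_noise text → Spec_remove_ocr_noise text (remove_ocr_noise text)

-- ===== LEMMAS AND PROOFS =====

-- Replacing a single character by a single character scans the string left to right: the helper
-- `PySem.Chars.replace.go` with singleton pattern/replacement is exactly a per-character map.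
lemma go_single (a b : Char) : ∀ (fuel : Nat) (l acc : List Char), l.length ≤ fuel →
    PySem.Chars.replace.go [a] [b] fuel l acc
      = acc.reverse ++ l.map (fun c => if c = a then b else c) := by
  intro fuel
  induction fuel with
  | zero => intro l acc h; simp at h; subst h; simp [PySem.Chars.replace.go]
  | succ n ih =>
    intro l acc h
    cases l with
    | nil => simp [PySem.Chars.replace.go]
    | cons c t =>
      simp only [PySem.Chars.replace.go, List.isPrefixOf]
      by_cases hc : c = a
      · subst hc; simp [ih t _ (by simpa using h)]
      · simp [hc, ih t _ (by simpa using h), Ne.symm]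

-- str.replace with 1-char pattern and replacement is a map over the characters.
lemma repl_single (s : String) (a b : Char) :
    PySem.Str.replace s (String.ofList [a]) (String.ofList [b])
      = String.ofList (s.toList.map (fun c => if c = a then b else c)) := by
  have h : (PySem.Str.replace s (String.ofList [a]) (String.ofList [b])).toList
      = s.toList.map (fun c => if c = a then b else c) := by
    rw [PySem.Str.toList_replace]
    simp [PySem.Chars.replace]
    rw [go_single a b s.length s.toList [] (by simp)]
    simp
  have h2 := congrArg String.ofList h
  rwa [String.ofList_toList] at h2

-- The dict literal's items in insertion order.
lemma ocr_items : ocrReplacements.items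
    = [('0','o'),('1','i'),('3','e'),('4','a'),('5','s'),('7','t'),('8','b'),('9','g')] := rfl

-- B's accumulator loop is a map with ocrFix.
lemma go_eq_map : ∀ (l acc : List Char), removeOcrGo acc l = acc.reverse ++ l.map ocrFix := by
  intro l
  induction l with
  | nil => intro acc; simp [removeOcrGo]
  | cons c t ih => intro acc; simp [removeOcrGo, ih]

-- The eight per-character substitution passes, applied in A's insertion order, produce the same
-- list as one pass with ocrFix: no replacement letter is itself a digit key, so later passes
-- never touch an earlier pass's output.
lemma maps_eq (l : List Char) :
    ((((((((l.map (fun c => if c = '0' then 'o' else c)).map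
        (fun c => if c = '1' then 'i' else c)).map
        (fun c => if c = '3' then 'e' else c)).map
        (fun c => if c = '4' then 'a' else c)).map
        (fun c => if c = '5' then 's' else c)).map
        (fun c => if c = '7' then 't' else c)).map
        (fun c => if c = '8' then 'b' else c)).map
        (fun c => if c = '9' then 'g' else c))
      = l.map ocrFix := by
  induction l with
  | nil => simp
  | cons c t ih =>
    simp only [List.map_cons]
    refine congrArg₂ List.cons ?_ ih
    unfold ocrFix
    by_cases h0 : c = '0'; · subst h0; decide
    by_cases h1 : c = '1'; · subst h1; decide
    by_cases h3 : c = '3'; · subst h3; decide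
    by_cases h4 : c = '4'; · subst h4; decide
    by_cases h5 : c = '5'; · subst h5; decide
    by_cases h7 : c = '7'; · subst h7; decide
    by_cases h8 : c = '8'; · subst h8; decide
    by_cases h9 : c = '9'; · subst h9; decide
    simp [h0, h1, h3, h4, h5, h7, h8, h9]

-- ===== VERDICT (by name: the statement is the Claim_ definition above) =====
theorem remove_ocr_noise_spec : Claim_equal_remove_ocr_noise := by
  unfold Claim_equal_remove_ocr_noise
  intro text _
  unfold Spec_remove_ocr_noise remove_ocr_noise remove_ocr_noise_alt
  rw [ocr_items]
  simp only [List.foldl_cons, List.foldl_nil]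
  rw [repl_single, repl_single, repl_single, repl_single, repl_single, repl_single, repl_single,
    repl_single]
  rw [go_eq_map]
  simp only [String.toList_ofList, List.reverse_nil, List.nil_append]
  exact congrArg String.ofList (maps_eq text.toList)
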